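-- pv_equiv track=rewrite | github.com/AndreyMeshkov/codewars-python | 7kyu/Balanced Number (Special Numbers Series 1 ).py | balanced_num
-- ===== SOURCE A (Python) =====
-- def balanced_num(number):
--     string = str(number)
--     center = int(len(string) / 2)
--     right_str = string[center + 1:]
--     if len(string) % 2 == 0:
--         left_str = string[0:center - 1]
--     else:
--         left_str = string[0:center]
--     left_sum = sum([int(x) for x in left_str])
--     right_sum = sum([int(x) for x in right_str])
--     return "Balanced" if left_sum == right_sum else "Not Balanced"
-- ===== SOURCE B (Python) =====
-- def balanced_num(number):
--     s = str(number)
--     l, r = 0, len(s) - 1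
--     left_sum = right_sum = 0
--     while l + 1 < r:
--         left_sum += int(s[l])
--         right_sum += int(s[r])
--         l += 1
--         r -= 1
--     return "Balanced" if left_sum == right_sum else "Not Balanced"
-- ===== Notes on version B (the rewrite author's own statement) =====
-- stated objective: alternative
-- what changed: Replaces A's slice construction (two computed slices plus two list comprehensions summed) with a single two-pointer while loop that walks inward from both ends accumulating both sums in one pass.
import Mathlib
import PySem

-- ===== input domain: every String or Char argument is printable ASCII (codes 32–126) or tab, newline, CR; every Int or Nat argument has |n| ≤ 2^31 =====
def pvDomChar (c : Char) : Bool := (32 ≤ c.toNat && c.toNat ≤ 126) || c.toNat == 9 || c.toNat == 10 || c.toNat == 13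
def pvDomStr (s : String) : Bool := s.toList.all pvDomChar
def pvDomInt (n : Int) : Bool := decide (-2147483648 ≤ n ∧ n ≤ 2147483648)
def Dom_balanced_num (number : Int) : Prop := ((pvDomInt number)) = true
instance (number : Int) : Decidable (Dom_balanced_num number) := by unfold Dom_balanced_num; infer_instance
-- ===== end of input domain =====

-- B replaces A's two computed slices and two summed comprehensions with a single
-- two-pointer loop walking inward from both ends (alternative decomposition, same cost).

-- ===== PORT A =====
-- int(x) for a single character x; Python raises ValueError on non-digit characters,
-- which happens only outside Pre_ (number ≤ -10); there the port defaults to 0.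
def pvDig (c : Char) : Int := (PySem.Int.ofStr? (String.ofList [c])).getD 0

def balanced_num (number : Int) : String :=
  let string := (PySem.Int.toStr number).toList       -- str(number)
  let center := string.length / 2                     -- int(len(string)/2); exact for these lengths
  let right_str := string.drop (center + 1)           -- string[center+1:], nonneg in-range slice
  let left_str :=
    if string.length % 2 == 0 then string.take (center - 1)   -- string[0:center-1] (center ≥ 1 here)
    else string.take center                                   -- string[0:center]
  let left_sum := (left_str.map pvDig).sum            -- sum([int(x) for x in left_str])
  let right_sum := (right_str.map pvDig).sum
  if left_sum == right_sum then "Balanced" else "Not Balanced"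

-- ===== PORT B =====
-- the while loop of Source B; indices stay in range while l + 1 < r, so getD is exact there
def bnLoop (cs : List Char) (l r : Nat) (ls rs : Int) : Int × Int :=
  if l + 1 < r then
    bnLoop cs (l + 1) (r - 1) (ls + pvDig (cs.getD l ' ')) (rs + pvDig (cs.getD r ' '))
  else (ls, rs)
termination_by r - l

def balanced_num_alt (number : Int) : String :=
  let s := (PySem.Int.toStr number).toList
  let p := bnLoop s 0 (s.length - 1) 0 0
  if p.1 == p.2 then "Balanced" else "Not Balanced"

-- ===== PRECONDITION & SPEC =====
-- Pre_ excludes exactly the multi-digit negative numbers, on which Python A raises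
-- ValueError (int applied to the sign character inside a slice); B raises there too.
def Pre_balanced_num (number : Int) : Prop := -9 ≤ number
instance (number : Int) : Decidable (Pre_balanced_num number) := by unfold Pre_balanced_num; infer_instance
def pvWitness_balanced_num : Int := (1230)
def Spec_balanced_num (number : Int) (out : String) : Prop := out = balanced_num_alt number
instance (number : Int) (out : String) : Decidable (Spec_balanced_num number out) := by unfold Spec_balanced_num; infer_instance

-- ===== CLAIM (what is proved, stated in full; the proofs are below) =====
def Claim_equal_balanced_num : Prop := ∀ (number : Int), Dom_balanced_num number → Pre_balanced_num number → Spec_balanced_num number (balanced_num number)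

-- ===== LEMMAS AND PROOFS =====

-- the two-pointer loop adds (r-l)/2 digits from the front to ls and the same number from the back to rs
lemma bnLoop_spec (cs : List Char) : ∀ (l r : Nat) (ls rs : Int), r < cs.length →
    bnLoop cs l r ls rs =
      (ls + (((cs.drop l).take ((r - l) / 2)).map pvDig).sum,
       rs + ((((cs.take (r + 1)).reverse).take ((r - l) / 2)).map pvDig).sum) := by
  intro l r ls rs hr
  induction l, r, ls, rs using bnLoop.induct cs with
  | case1 l r ls rs hlt ih =>
    rw [bnLoop, if_pos hlt]
    have hl : l < cs.length := by omega
    rw [ih (by omega)]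
    have hk : (r - l) / 2 = ((r - 1) - (l + 1)) / 2 + 1 := by omega
    have hr1 : (r - 1) + 1 = r := by omega
    have htake : cs.take (r + 1) = cs.take r ++ [cs[r]] := by
      rw [List.take_add_one]
      simp [List.getElem?_eq_getElem hr]
    rw [hk, hr1, List.drop_eq_getElem_cons hl, htake, List.reverse_append,
      List.reverse_singleton, List.singleton_append, List.take_succ_cons,
      List.take_succ_cons, List.map_cons, List.map_cons, List.sum_cons, List.sum_cons,
      List.getD_eq_getElem cs ' ' hl, List.getD_eq_getElem cs ' ' hr]
    simp only [Prod.mk.injEq]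
    constructor <;> ring
  | case2 l r ls rs hlt =>
    rw [bnLoop, if_neg hlt]
    have hk : (r - l) / 2 = 0 := by omega
    simp [hk]

-- B's back segment, reversed, is A's right slice (sums agree since order is irrelevant)
lemma rev_take_sum (cs : List Char) (k : Nat) :
    ((cs.reverse.take k).map pvDig).sum = (((cs.drop (cs.length - k)).map pvDig).sum) := by
  rw [List.take_reverse, List.map_reverse, List.sum_reverse]

theorem balanced_num_equal (number : Int) : balanced_num number = balanced_num_alt number := by
  unfold balanced_num balanced_num_alt
  dsimp only
  set cs := (PySem.Int.toStr number).toList with hcs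
  rcases Nat.eq_zero_or_pos cs.length with h0 | hpos
  · have : cs = [] := List.eq_nil_of_length_eq_zero h0
    simp [this, bnLoop]
  · have hr : cs.length - 1 < cs.length := by omega
    rw [bnLoop_spec cs 0 (cs.length - 1) 0 0 hr]
    have hk : (cs.length - 1 - 0) / 2 = (cs.length - 1) / 2 := by omega
    have htr : cs.length - 1 + 1 = cs.length := by omega
    set n := cs.length with hn
    set k := (n - 1) / 2 with hkdef
    -- A's left slice length equals k
    have hleft : (if n % 2 == 0 then cs.take (n / 2 - 1) else cs.take (n / 2)) = cs.take k := by
      by_cases hpar : n % 2 = 0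
      · have : n / 2 - 1 = k := by omega
        simp [hpar, this]
      · have h1 : n % 2 = 1 := by omega
        have : n / 2 = k := by omega
        simp [h1, this]
    -- A's right slice sum equals B's back-segment sum
    have hkle : k ≤ n := by omega
    have hright : ((cs.reverse.take k).map pvDig).sum = ((cs.drop (n / 2 + 1)).map pvDig).sum := by
      have : n - k = n / 2 + 1 := by omega
      rw [rev_take_sum cs k, this]
    have htn : List.take n cs = cs := by simp [hn]
    simp only [hk, htr, List.drop_zero, zero_add]
    rw [hleft, htn, hright]

-- ===== VERDICT (by name: the statement is the Claim_ definition above) =====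
theorem balanced_num_spec : Claim_equal_balanced_num := by
  intro number _ _
  unfold Spec_balanced_num
  exact balanced_num_equal number
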